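-- pv_equiv track=rewrite | github.com/flaviolunaferreira/sd-06-restaurant-orders | src/utils/filters.py | user_never_came
-- ===== SOURCE A (Python) =====
-- def user_never_came(name, data):
--     order_days = []
--     for order in data:
--         if order[2] not in order_days:
--             order_days.append(order[2])
--
--     orders_by_name = [order[2] for order in data if order[0] == name]
--
--     all_orders_type = []
--     for order in orders_by_name:
--         if order not in all_orders_type:
--             all_orders_type.append(order)
--
--     order_never_asked = set(order_days).difference(set(all_orders_type))
--
--     return order_never_asked
-- ===== SOURCE B (Python) =====
-- def user_never_came(name, data):
--     seen = {}
--     for order in data: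
--         seen[order[2]] = seen.get(order[2], False) or (order[0] == name)
--     return {day for day, by_user in seen.items() if not by_user}
-- ===== Notes on version B (the rewrite author's own statement) =====
-- stated objective: simpler
-- what changed: Replaces A's two dedup loops, list comprehension and explicit set difference with a single pass that maintains one day->flag dict (flag = 'ordered by name'), then keeps the unflagged days.
import Mathlib
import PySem

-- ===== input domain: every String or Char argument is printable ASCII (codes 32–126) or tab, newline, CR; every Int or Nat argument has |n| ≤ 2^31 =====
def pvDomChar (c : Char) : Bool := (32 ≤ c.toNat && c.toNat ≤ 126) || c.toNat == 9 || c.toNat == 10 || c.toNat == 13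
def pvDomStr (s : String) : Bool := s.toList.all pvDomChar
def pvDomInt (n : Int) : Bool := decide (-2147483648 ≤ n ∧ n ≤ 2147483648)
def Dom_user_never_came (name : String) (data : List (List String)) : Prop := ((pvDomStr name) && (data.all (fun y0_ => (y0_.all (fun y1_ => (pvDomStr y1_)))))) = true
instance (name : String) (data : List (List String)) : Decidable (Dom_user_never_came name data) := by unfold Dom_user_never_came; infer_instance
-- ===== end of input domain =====

-- B replaces A's two quadratic dedup loops, comprehension and explicit set difference with a single pass that
-- maintains one day->flag dict (flag = "ordered by name") and then keeps the unflagged days; objective: simpler.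


-- ===== PORT A =====
-- order[2] / order[0] are ported as pyGetD with default "": Pre_ guarantees the index is in range, so the default is never read.
def user_never_came (name : String) (data : List (List String)) : List String :=
  let order_days := data.foldl (fun acc order =>
      if acc.contains (PySem.List.pyGetD order 2 "") then acc
      else acc ++ [PySem.List.pyGetD order 2 ""]) []
  let orders_by_name := (data.filter (fun order => PySem.List.pyGetD order 0 "" == name)).map
      (fun order => PySem.List.pyGetD order 2 "")
  let all_orders_type := orders_by_name.foldl (fun acc order =>
      if acc.contains order then acc else acc ++ [order]) []
  PySem.Set.diff (PySem.Set.ofList order_days) (PySem.Set.ofList all_orders_type)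

-- ===== PORT B =====
def user_never_came_alt (name : String) (data : List (List String)) : List String :=
  let seen := data.foldl (fun d order =>
      d.insert (PySem.List.pyGetD order 2 "")
        (d.getD (PySem.List.pyGetD order 2 "") false || (PySem.List.pyGetD order 0 "" == name)))
      PySem.Dict.empty
  PySem.Set.ofList ((seen.items.filter (fun p => !p.2)).map (·.1))

-- ===== PRECONDITION & SPEC =====
-- Pre_ excludes exactly the inputs on which the Python A raises IndexError: some order with fewer than 3 fields.
def Pre_user_never_came (name : String) (data : List (List String)) : Prop :=
  ∀ o ∈ data, 3 ≤ o.length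
instance (name : String) (data : List (List String)) : Decidable (Pre_user_never_came name data) := by unfold Pre_user_never_came; infer_instance
def pvWitness_user_never_came : String × List (List String) :=
  ("Ana", [["Ana", "hamburguer", "monday"], ["Bob", "pizza", "tuesday"]])

def Spec_user_never_came (name : String) (data : List (List String)) (out : List String) : Prop := out = user_never_came_alt name data
instance (name : String) (data : List (List String)) (out : List String) : Decidable (Spec_user_never_came name data out) := by unfold Spec_user_never_came; infer_instance

-- ===== CLAIM (what is proved, stated in full; the proofs are below) =====
def Claim_equal_user_never_came : Prop := ∀ (name : String) (data : List (List String)), Dom_user_never_came name data → Pre_user_never_came name data → Spec_user_never_came name data (user_never_came name data)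

-- ===== LEMMAS AND PROOFS =====

-- order[2] and order[0] of an order row, as both ports read them
def pvG2 (o : List String) : String := PySem.List.pyGetD o 2 ""
def pvG0 (o : List String) : String := PySem.List.pyGetD o 0 ""

-- "day k was ordered by `name` somewhere in data"
def pvFlag (name : String) (data : List (List String)) (k : String) : Bool :=
  data.any (fun o => (pvG2 o == k) && (pvG0 o == name))

-- B's dict-building loop, named for the induction
def pvSeen (name : String) (data : List (List String)) : PySem.Dict String Bool :=
  data.foldl (fun d o => d.insert (pvG2 o) (d.getD (pvG2 o) false || (pvG0 o == name))) PySem.Dict.empty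

lemma pvOfList_append (l : List String) (x : String) :
    PySem.Set.ofList (l ++ [x]) = PySem.Set.add (PySem.Set.ofList l) x := by
  simp [PySem.Set.ofList, List.foldl_append]

-- Invariant of B's pass: the dict's items are exactly the first-occurrence days, each paired with its flag.
lemma pvSeen_items (name : String) (data : List (List String)) :
    (pvSeen name data).items
    = (PySem.Set.ofList (data.map pvG2)).map (fun k => (k, pvFlag name data k)) := by
  induction data using List.reverseRecOn with
  | nil => simp [pvSeen, PySem.Set.ofList, PySem.Dict.empty, pvFlag]
  | append_singleton data o ih =>
    have hfoldl : pvSeen name (data ++ [o])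
        = (pvSeen name data).insert (pvG2 o)
            ((pvSeen name data).getD (pvG2 o) false || (pvG0 o == name)) := by
      simp [pvSeen, List.foldl_append]
    set S := PySem.Set.ofList (data.map pvG2) with hS
    have hnd : S.Nodup := PySem.Set.nodup_ofList _
    have hkeys : (pvSeen name data).keys = S := by
      simp [PySem.Dict.keys, ih, Function.comp_def]
    have hknd : (pvSeen name data).keys.Nodup := by rw [hkeys]; exact hnd
    have hmapS : (data ++ [o]).map pvG2 = data.map pvG2 ++ [pvG2 o] := by simp
    by_cases hm : pvG2 o ∈ S
    · have hcont : (pvSeen name data).contains (pvG2 o) = true := by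
        rw [PySem.Dict.contains_iff_mem_keys, hkeys]; exact hm
      have hget : (pvSeen name data).getD (pvG2 o) false = pvFlag name data (pvG2 o) := by
        exact PySem.Dict.getD_of_mem_items _ (by rw [ih]; exact List.mem_map_of_mem hm) hknd false
      have hS' : PySem.Set.ofList ((data ++ [o]).map pvG2) = S := by
        rw [hmapS, pvOfList_append, ← hS, PySem.Set.add]
        simp [PySem.Set.contains, hm]
      rw [hfoldl, hS', PySem.Dict.items_insert_of_contains _ _ hcont, hget, ih, List.map_map]
      apply List.map_congr_left
      intro k hk
      by_cases hke : k = pvG2 o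
      · subst hke
        simp [pvFlag, List.any_append]
      · simp [Function.comp, hke, pvFlag, List.any_append, Ne.symm hke]
    · have hcont : (pvSeen name data).contains (pvG2 o) = false := by
        rw [← Bool.not_eq_true, PySem.Dict.contains_iff_mem_keys, hkeys]; exact hm
      have hget : (pvSeen name data).getD (pvG2 o) false = false :=
        PySem.Dict.getD_of_not_contains _ _ hcont
      have hS' : PySem.Set.ofList ((data ++ [o]).map pvG2) = S ++ [pvG2 o] := by
        rw [hmapS, pvOfList_append, ← hS, PySem.Set.add]
        simp [PySem.Set.contains, hm]
      have hflag0 : pvFlag name data (pvG2 o) = false := by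
        rw [← Bool.not_eq_true, pvFlag, List.any_eq_true]
        rintro ⟨o', ho', h⟩
        simp only [Bool.and_eq_true, beq_iff_eq] at h
        exact hm (h.1 ▸ (PySem.Set.mem_ofList _ _).2 (List.mem_map_of_mem ho'))
      rw [hfoldl, hS', PySem.Dict.items_insert_of_not_contains _ _ hcont, hget, ih]
      rw [List.map_append]
      congr 1
      · apply List.map_congr_left
        intro k hk
        have hke : pvG2 o ≠ k := fun h => hm (h ▸ hk)
        simp [pvFlag, List.any_append, hke]
      · have h0 := hflag0
        simp only [pvFlag] at h0
        simp [pvFlag, List.any_append, h0]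

-- Both ports reduce to the same closed form: first-occurrence days whose flag is false.
lemma pvMain (name : String) (data : List (List String)) :
    user_never_came name data = user_never_came_alt name data := by
  have hseen : (data.foldl (fun d order =>
      d.insert (PySem.List.pyGetD order 2 "")
        (d.getD (PySem.List.pyGetD order 2 "") false || (PySem.List.pyGetD order 0 "" == name)))
      PySem.Dict.empty) = pvSeen name data := rfl
  set S := PySem.Set.ofList (data.map pvG2) with hS
  have hnd : S.Nodup := PySem.Set.nodup_ofList _
  have hB : user_never_came_alt name data = S.filter (fun k => !pvFlag name data k) := by
    rw [user_never_came_alt]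
    simp only [hseen, pvSeen_items name data, ← hS]
    rw [List.filter_map, List.map_map]
    have : ((fun p : String × Bool => !p.2) ∘ fun k => (k, pvFlag name data k))
         = fun k => !pvFlag name data k := rfl
    rw [this]
    have h2 : ((fun p : String × Bool => p.1) ∘ fun k => (k, pvFlag name data k))
         = fun k => k := rfl
    rw [h2, List.map_id']
    exact PySem.Set.ofList_eq_self_of_nodup _ (hnd.filter _)
  have hdays : (data.foldl (fun acc order =>
      if acc.contains (PySem.List.pyGetD order 2 "") then acc
      else acc ++ [PySem.List.pyGetD order 2 ""]) []) = S := by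
    rw [hS, PySem.Set.ofList, List.foldl_map]
    rfl
  have hT : ∀ l : List String, (l.foldl (fun acc order =>
      if acc.contains order then acc else acc ++ [order]) []) = PySem.Set.ofList l := by
    intro l; rw [PySem.Set.ofList]; rfl
  rw [user_never_came, hB]
  simp only [hdays, hT]
  rw [PySem.Set.ofList_eq_self_of_nodup _ hnd, PySem.Set.diff]
  apply List.filter_congr
  intro k hk
  congr 1
  have hmem : (PySem.Set.ofList (PySem.Set.ofList ((data.filter
      (fun order => PySem.List.pyGetD order 0 "" == name)).map
      (fun order => PySem.List.pyGetD order 2 "")))).contains k = true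
      ↔ pvFlag name data k = true := by
    simp [PySem.Set.contains, PySem.Set.mem_ofList, pvFlag, pvG0, pvG2,
      List.mem_filter, List.mem_map]
    constructor
    · rintro ⟨o, ⟨ho, hn⟩, hk2⟩; exact ⟨o, ho, hk2, hn⟩
    · rintro ⟨o, ho, hk2, hn⟩; exact ⟨o, ⟨ho, hn⟩, hk2⟩
  cases hb : pvFlag name data k with
  | true => simpa [hb] using hmem.2 hb
  | false =>
    rcases Bool.eq_false_or_eq_true ((PySem.Set.ofList (PySem.Set.ofList _)).contains k) with h | h
    · rw [hmem.1 h] at hb; cases hb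
    · exact h

-- ===== VERDICT (by name: the statement is the Claim_ definition above) =====
theorem user_never_came_spec : Claim_equal_user_never_came := by
  intro name data _ _
  exact pvMain name data
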